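-- pv_equiv track=rewrite | github.com/gregjonesdev/derbylane | pww/management/commands/exotic_test.py | get_unique_exactas
-- ===== SOURCE A (Python) =====
-- def get_unique_exactas(matches_first, matches_second):
--     unique_exactas = []
--     i = 0
--     while i < len(matches_first):
--         first = matches_first[i]
--         j = 0
--         while j < len(matches_second):
--             second = matches_second[j]
--             if not first == second:
--                 if not (first, second) in unique_exactas:
--                     unique_exactas.append((first, second))
--             j += 1
--         i += 1
--
--     return unique_exactas
-- ===== SOURCE B (Python) =====
-- def get_unique_exactas(matches_first, matches_second):
--     firsts = []
--     for x in matches_first: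
--         if x not in firsts:
--             firsts.append(x)
--     seconds = []
--     for y in matches_second:
--         if y not in seconds:
--             seconds.append(y)
--     result = []
--     for first in firsts:
--         for second in seconds:
--             if not first == second:
--                 result.append((first, second))
--     return result
-- ===== Notes on version B (the rewrite author's own statement) =====
-- stated objective: faster
-- what changed: Deduplicate both input lists once (first-occurrence order), then emit every unequal pair with a plain nested loop, removing A's per-pair membership scan of the growing output list.
import Mathlib
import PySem

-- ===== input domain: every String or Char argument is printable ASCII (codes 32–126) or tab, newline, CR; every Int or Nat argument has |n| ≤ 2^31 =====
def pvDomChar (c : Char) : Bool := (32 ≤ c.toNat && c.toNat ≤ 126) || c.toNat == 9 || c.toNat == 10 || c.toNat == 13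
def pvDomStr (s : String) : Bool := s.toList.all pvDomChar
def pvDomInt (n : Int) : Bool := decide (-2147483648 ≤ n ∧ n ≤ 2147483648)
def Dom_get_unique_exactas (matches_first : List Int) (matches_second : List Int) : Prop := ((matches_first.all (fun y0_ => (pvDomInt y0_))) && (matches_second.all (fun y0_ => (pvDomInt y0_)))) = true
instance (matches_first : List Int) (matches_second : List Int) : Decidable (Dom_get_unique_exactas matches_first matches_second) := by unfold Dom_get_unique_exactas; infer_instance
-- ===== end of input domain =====

-- B deduplicates both inputs once (first-occurrence order) and then emits every unequal pair
-- with a plain nested loop, removing A's membership scan of the growing output list.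

-- ===== PORT A =====
-- A: nested while loops over both lists; a pair (first, second) (ported as the 2-element
-- list [first, second]) is appended when first ≠ second and it is not already in the output.
def get_unique_exactas (matches_first : List Int) (matches_second : List Int) : List (List Int) :=
  matches_first.foldl (fun acc first =>
    matches_second.foldl (fun acc2 second =>
      if first = second then acc2
      else if [first, second] ∈ acc2 then acc2
      else acc2 ++ [[first, second]]) acc) []

-- ===== PORT B =====
-- order-preserving dedup: `for x in xs: if x not in out: out.append(x)`
def pyDedup (xs : List Int) : List Int :=
  xs.foldl (fun out x => if x ∈ out then out else out ++ [x]) []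

def get_unique_exactas_alt (matches_first : List Int) (matches_second : List Int) : List (List Int) :=
  (pyDedup matches_first).foldl (fun res first =>
    (pyDedup matches_second).foldl (fun res2 second =>
      if first = second then res2
      else res2 ++ [[first, second]]) res) []

-- ===== PRECONDITION & SPEC =====
def Spec_get_unique_exactas (matches_first : List Int) (matches_second : List Int) (out : List (List Int)) : Prop := out = get_unique_exactas_alt matches_first matches_second
instance (matches_first : List Int) (matches_second : List Int) (out : List (List Int)) : Decidable (Spec_get_unique_exactas matches_first matches_second out) := by unfold Spec_get_unique_exactas; infer_instance

-- ===== CLAIM (what is proved, stated in full; the proofs are below) =====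
def Claim_equal_get_unique_exactas : Prop := ∀ (matches_first : List Int) (matches_second : List Int), Dom_get_unique_exactas matches_first matches_second → Spec_get_unique_exactas matches_first matches_second (get_unique_exactas matches_first matches_second)

-- ===== LEMMAS AND PROOFS =====

-- the elements of `xs` that are new relative to the already-seen list `R`, in order, deduplicated
def newElems (R : List Int) : List Int → List Int
  | [] => []
  | x :: t => if x ∈ R then newElems R t else x :: newElems (R ++ [x]) t

theorem foldl_dedup_eq (xs : List Int) : ∀ (a : List Int),
    xs.foldl (fun out x => if x ∈ out then out else out ++ [x]) a = a ++ newElems a xs := by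
  induction xs with
  | nil => intro a; simp [newElems]
  | cons x t ih =>
    intro a
    by_cases hx : x ∈ a <;> simp [List.foldl, newElems, hx, ih]

theorem pyDedup_eq (xs : List Int) : pyDedup xs = newElems [] xs := by
  simpa using foldl_dedup_eq xs []

theorem mem_newElems_of_mem {x : Int} : ∀ (R xs : List Int), x ∈ xs → x ∈ R ∨ x ∈ newElems R xs := by
  intro R xs
  induction xs generalizing R with
  | nil => simp
  | cons y t ih =>
    intro h
    rcases List.mem_cons.mp h with rfl | h
    · by_cases hy : x ∈ R
      · exact Or.inl hy
      · simp [newElems, hy]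
    · by_cases hy : y ∈ R
      · simpa [newElems, hy] using ih R h
      · rcases ih (R ++ [y]) h with hR | hN
        · rcases List.mem_append.mp hR with hR | hR
          · exact Or.inl hR
          · simp_all [newElems]
        · simp [newElems, hy, hN]

-- the pairs B's inner loop produces for a given `first`
def pairsF (D : List Int) (f : Int) : List (List Int) :=
  (D.filter (fun s => f ≠ s)).map (fun s => [f, s])

theorem inner2_eq (f : Int) : ∀ (L : List Int) (a : List (List Int)),
    L.foldl (fun res2 s => if f = s then res2 else res2 ++ [[f, s]]) a = a ++ pairsF L f := by
  intro L
  induction L with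
  | nil => intro a; simp [pairsF]
  | cons s t ih =>
    intro a
    by_cases hs : f = s
    · subst hs
      simp [List.foldl, pairsF, ih]
    · simp [List.foldl, pairsF, hs, ih]

-- B's accumulated result over a list of firsts
def buildB (D : List Int) (Fs : List Int) : List (List Int) :=
  Fs.flatMap (pairsF D)

theorem mem_buildB {D Fs : List Int} {x : List Int} :
    x ∈ buildB D Fs ↔ ∃ f ∈ Fs, ∃ s ∈ D, f ≠ s ∧ x = [f, s] := by
  simp only [buildB, List.mem_flatMap, pairsF, List.mem_map, List.mem_filter]
  constructor
  · rintro ⟨f, hf, s, ⟨hs, hne⟩, rfl⟩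
    exact ⟨f, hf, s, hs, by simpa using hne, rfl⟩
  · rintro ⟨f, hf, s, hs, hne, rfl⟩
    exact ⟨f, hf, s, ⟨hs, by simpa using hne⟩, rfl⟩

theorem pair_mem_buildB {D Fs : List Int} {f s : Int} :
    [f, s] ∈ buildB D Fs ↔ f ∈ Fs ∧ s ∈ D ∧ f ≠ s := by
  rw [mem_buildB]
  constructor
  · rintro ⟨f', hf', s', hs', hne, h⟩
    obtain ⟨rfl, rfl⟩ : f = f' ∧ s = s' := by
      simpa using h
    exact ⟨hf', hs', hne⟩
  · rintro ⟨hf, hs, hne⟩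
    exact ⟨f, hf, s, hs, hne, rfl⟩

-- A's inner loop adds nothing when every candidate pair is already present
theorem innerA_saturated (f : Int) : ∀ (ms : List Int) (acc : List (List Int)),
    (∀ s ∈ ms, f ≠ s → [f, s] ∈ acc) →
    ms.foldl (fun acc2 s => if f = s then acc2 else if [f, s] ∈ acc2 then acc2 else acc2 ++ [[f, s]]) acc = acc := by
  intro ms
  induction ms with
  | nil => intro acc _; rfl
  | cons s t ih =>
    intro acc h
    by_cases hs : f = s
    · simp only [List.foldl, if_pos hs]
      exact ih acc (fun s' hs' => h s' (List.mem_cons_of_mem _ hs'))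
    · have hm : [f, s] ∈ acc := h s (List.mem_cons_self) hs
      simp only [List.foldl, if_neg hs, if_pos hm]
      exact ih acc (fun s' hs' => h s' (List.mem_cons_of_mem _ hs'))

-- A's inner loop, characterized: it appends exactly the pairs for the not-yet-seen seconds
theorem innerA_eq (f : Int) : ∀ (ms R : List Int) (acc : List (List Int)),
    (∀ s : Int, [f, s] ∈ acc ↔ (f ≠ s ∧ s ∈ R)) →
    ms.foldl (fun acc2 s => if f = s then acc2 else if [f, s] ∈ acc2 then acc2 else acc2 ++ [[f, s]]) acc
      = acc ++ pairsF (newElems R ms) f := by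
  intro ms
  induction ms with
  | nil => intro R acc _; simp [newElems, pairsF]
  | cons s t ih =>
    intro R acc h
    by_cases hs : f = s
    · subst hs
      by_cases hR : f ∈ R
      · rw [List.foldl_cons, if_pos rfl,
          show newElems R (f :: t) = newElems R t from by simp [newElems, hR]]
        exact ih R acc h
      · rw [List.foldl_cons, if_pos rfl,
          show newElems R (f :: t) = f :: newElems (R ++ [f]) t from by simp [newElems, hR],
          ih (R ++ [f]) acc ?_]
        · simp [pairsF]
        · intro s'
          rw [h s']
          constructor
          · rintro ⟨hne, hm⟩; exact ⟨hne, by simp [hm]⟩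
          · rintro ⟨hne, hm⟩
            rcases List.mem_append.mp hm with hm | hm
            · exact ⟨hne, hm⟩
            · exact (hne (List.mem_singleton.mp hm).symm).elim
    · by_cases hR : s ∈ R
      · have hm : [f, s] ∈ acc := (h s).mpr ⟨hs, hR⟩
        rw [List.foldl_cons, if_neg hs, if_pos hm,
          show newElems R (s :: t) = newElems R t from by simp [newElems, hR]]
        exact ih R acc h
      · have hm : [f, s] ∉ acc := by rw [h s]; rintro ⟨_, hmem⟩; exact hR hmem
        rw [List.foldl_cons, if_neg hs, if_neg hm,
          show newElems R (s :: t) = s :: newElems (R ++ [s]) t from by simp [newElems, hR],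
          ih (R ++ [s]) (acc ++ [[f, s]]) ?_]
        · simp [pairsF, hs]
        · intro s'
          constructor
          · intro hmem
            rcases List.mem_append.mp hmem with hm' | hm'
            · obtain ⟨hne, hR'⟩ := (h s').mp hm'
              exact ⟨hne, List.mem_append_left _ hR'⟩
            · obtain ⟨-, rfl⟩ : f = f ∧ s' = s := by
                simpa using List.mem_singleton.mp hm'
              exact ⟨hs, by simp⟩
          · rintro ⟨hne, hmem⟩
            rcases List.mem_append.mp hmem with hm' | hm'
            · exact List.mem_append_left _ ((h s').mpr ⟨hne, hm'⟩)
            · have : s' = s := List.mem_singleton.mp hm'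
              subst this
              simp

-- A's outer loop maintains: accumulator = buildB over the deduped firsts processed so far
theorem outerA (ms : List Int) : ∀ (mf Fs : List Int),
    mf.foldl (fun acc first =>
      ms.foldl (fun acc2 second =>
        if first = second then acc2
        else if [first, second] ∈ acc2 then acc2
        else acc2 ++ [[first, second]]) acc) (buildB (newElems [] ms) Fs)
    = buildB (newElems [] ms) (Fs ++ newElems Fs mf) := by
  intro mf
  induction mf with
  | nil => intro Fs; simp [newElems]
  | cons f t ih =>
    intro Fs
    by_cases hf : f ∈ Fs
    · simp only [List.foldl]
      rw [innerA_saturated f ms _ ?_, ih Fs, newElems, if_pos hf]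
      intro s hs hne
      rw [pair_mem_buildB]
      refine ⟨hf, ?_, hne⟩
      rcases mem_newElems_of_mem [] ms hs with h | h
      · simp at h
      · exact h
    · simp only [List.foldl]
      rw [innerA_eq f ms [] _ ?_]
      · have hstep : buildB (newElems [] ms) Fs ++ pairsF (newElems [] ms) f
            = buildB (newElems [] ms) (Fs ++ [f]) := by
          simp [buildB]
        rw [hstep, ih (Fs ++ [f]), newElems, if_neg hf]
        simp [List.append_assoc]
      · intro s
        rw [pair_mem_buildB]
        simp [hf]

theorem get_unique_exactas_A_eq (mf ms : List Int) :
    get_unique_exactas mf ms = buildB (newElems [] ms) (newElems [] mf) := by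
  have := outerA ms mf []
  simpa [get_unique_exactas, buildB] using this

theorem get_unique_exactas_B_eq (mf ms : List Int) :
    get_unique_exactas_alt mf ms = buildB (newElems [] ms) (newElems [] mf) := by
  unfold get_unique_exactas_alt
  rw [pyDedup_eq, pyDedup_eq]
  generalize newElems [] mf = Fs
  generalize newElems [] ms = D
  induction Fs using List.reverseRecOn with
  | nil => simp [buildB]
  | append_singleton t f ih =>
    rw [List.foldl_append, ih, List.foldl_cons, List.foldl_nil, inner2_eq]
    simp [buildB]

-- ===== VERDICT (by name: the statement is the Claim_ definition above) =====
theorem get_unique_exactas_spec : Claim_equal_get_unique_exactas := by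
  intro mf ms _
  unfold Spec_get_unique_exactas
  rw [get_unique_exactas_A_eq, get_unique_exactas_B_eq]
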